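-- pv_equiv track=rewrite | github.com/NeonicFlames/Real-Time-Defect-Detection-System-for-Jetson-Nano | run.py | count_defects
-- ===== SOURCE A (Python) =====
-- class Config:
--     # Camera settings
--     CAMERA_WIDTH = 320
--     CAMERA_HEIGHT = 240
--     TARGET_FPS = 5
--     DISPLAY_SCALE = 3.0
--
--     # Timing settings
--     SWITCH_DELAY = 1.0      # Wait before switching cameras
--     DETECTION_DELAY = 2.0   # Wait after switch before detecting
--
--     # NEW: Confirmation settings
--     CONFIRMATION_FRAMES = 2      # Must detect for 3 consecutive frames
--     CONFIRMATION_MIN_TIME = 0.1  # Must detect for at least 1 second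
--
--     # Detection settings
--     ROI_LINE_POSITION = 0.5  # Middle of frame
--     ROI_THRESHOLD = 15       # Pixels around ROI line
--
--     # Class IDs for 6-class model
--     SIDE_DENT = 0
--     SIDE_HOLE = 1
--     SIDE_PRODUCT = 2
--     TOP_DENT = 3
--     TOP_HOLE = 4
--     TOP_PRODUCT = 5
--
-- def count_defects(detections, is_camera_0):
--     holes = 0
--     dents = 0
--
--     for det in detections:
--         if is_camera_0:
--             if det['cls_id'] == Config.TOP_HOLE:
--                 holes += 1
--             elif det['cls_id'] == Config.TOP_DENT:
--                 dents += 1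
--         else:
--             if det['cls_id'] == Config.SIDE_HOLE:
--                 holes += 1
--             elif det['cls_id'] == Config.SIDE_DENT:
--                 dents += 1
--
--     return holes, dents
-- ===== SOURCE B (Python) =====
-- def count_defects(detections, is_camera_0):
--     counts = {}
--     for d in detections:
--         c = d['cls_id']
--         counts[c] = counts.get(c, 0) + 1
--     hole_id, dent_id = (4, 3) if is_camera_0 else (1, 0)
--     return counts.get(hole_id, 0), counts.get(dent_id, 0)
-- ===== Notes on version B (the rewrite author's own statement) =====
-- stated objective: alternative
-- what changed: Replaces the per-element two-branch conditional accumulation with a one-pass frequency histogram (dict counter) followed by two lookups of the camera-specific hole/dent class ids.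
import Mathlib
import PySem

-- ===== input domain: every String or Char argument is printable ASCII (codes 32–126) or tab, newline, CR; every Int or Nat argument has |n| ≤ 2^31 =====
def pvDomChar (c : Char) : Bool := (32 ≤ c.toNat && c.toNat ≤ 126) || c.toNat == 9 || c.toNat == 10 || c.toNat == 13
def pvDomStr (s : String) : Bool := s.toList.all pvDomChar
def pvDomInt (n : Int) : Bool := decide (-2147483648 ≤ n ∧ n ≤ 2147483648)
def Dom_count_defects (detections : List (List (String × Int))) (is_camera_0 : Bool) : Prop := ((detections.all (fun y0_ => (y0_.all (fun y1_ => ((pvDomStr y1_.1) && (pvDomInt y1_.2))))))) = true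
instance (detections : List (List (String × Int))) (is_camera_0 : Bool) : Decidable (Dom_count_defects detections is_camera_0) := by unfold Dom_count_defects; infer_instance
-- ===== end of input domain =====

-- B replaces A's per-element conditional accumulation with a one-pass frequency
-- histogram (dict counter) followed by two camera-specific id lookups (alternative, same cost).


-- ===== PORT A =====
-- d['cls_id'] is PySem.Dict.get? (Pre_ guarantees the key is present; Python raises KeyError otherwise)
def count_defects (detections : List (List (String × Int))) (is_camera_0 : Bool) : Int × Int :=
  let r := detections.foldl (fun (s : Int × Int) det =>
    if is_camera_0 then
      if (PySem.Dict.mk det).get? "cls_id" = some 4 then (s.1 + 1, s.2)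
      else if (PySem.Dict.mk det).get? "cls_id" = some 3 then (s.1, s.2 + 1)
      else s
    else
      if (PySem.Dict.mk det).get? "cls_id" = some 1 then (s.1 + 1, s.2)
      else if (PySem.Dict.mk det).get? "cls_id" = some 0 then (s.1, s.2 + 1)
      else s) (0, 0)
  r

-- ===== PORT B =====
-- histogram keyed by the (optional) cls_id value; counts.get(c,0)+1 / counts[c]=… is Dict.modify
def count_defects_alt (detections : List (List (String × Int))) (is_camera_0 : Bool) : Int × Int :=
  let counts : PySem.Dict (Option Int) Int :=
    detections.foldl (fun c det => c.modify ((PySem.Dict.mk det).get? "cls_id") 0 (· + 1)) PySem.Dict.empty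
  let ids : Int × Int := if is_camera_0 then (4, 3) else (1, 0)
  (counts.getD (some ids.1) 0, counts.getD (some ids.2) 0)

-- ===== PRECONDITION & SPEC =====
-- Pre_ excludes exactly the inputs where some detection lacks the 'cls_id' key: Python A raises KeyError there.
def Pre_count_defects (detections : List (List (String × Int))) (is_camera_0 : Bool) : Prop :=
  ∀ det ∈ detections, ((PySem.Dict.mk det).get? "cls_id").isSome = true
instance (detections : List (List (String × Int))) (is_camera_0 : Bool) : Decidable (Pre_count_defects detections is_camera_0) := by unfold Pre_count_defects; infer_instance
def pvWitness_count_defects : (List (List (String × Int))) × Bool := ([[("cls_id", 4)], [("cls_id", 0)]], true)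
def Spec_count_defects (detections : List (List (String × Int))) (is_camera_0 : Bool) (out : Int × Int) : Prop := out = count_defects_alt detections is_camera_0
instance (detections : List (List (String × Int))) (is_camera_0 : Bool) (out : Int × Int) : Decidable (Spec_count_defects detections is_camera_0 out) := by unfold Spec_count_defects; infer_instance

-- ===== CLAIM (what is proved, stated in full; the proofs are below) =====
def Claim_equal_count_defects : Prop := ∀ (detections : List (List (String × Int))) (is_camera_0 : Bool), Dom_count_defects detections is_camera_0 → Pre_count_defects detections is_camera_0 → Spec_count_defects detections is_camera_0 (count_defects detections is_camera_0)

-- ===== LEMMAS AND PROOFS =====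

-- A's accumulation loop counts the two class ids of interest
theorem loopA_eq_counts (g : List (String × Int) → Option Int) (hole dent : Int)
    (hne : hole ≠ dent) (l : List (List (String × Int))) (h d : Int) :
    l.foldl (fun (s : Int × Int) det =>
      if g det = some hole then (s.1 + 1, s.2)
      else if g det = some dent then (s.1, s.2 + 1)
      else s) (h, d)
    = (h + (l.map g).count (some hole), d + (l.map g).count (some dent)) := by
  induction l generalizing h d with
  | nil => simp
  | cons x xs ih =>
    simp only [List.foldl_cons, List.map_cons, List.count_cons]
    by_cases h1 : g x = some hole
    · have h2 : g x ≠ some dent := by simp [h1]; omega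
      simp [h1, ih]; omega
    · by_cases h2 : g x = some dent
      · simp [h2, ih, Ne.symm hne]; omega
      · simp [h1, h2, ih]

-- B's histogram lookup is a count
theorem counterB_getD (l : List (List (String × Int))) (v : Option Int) :
    (l.foldl (fun (c : PySem.Dict (Option Int) Int) det =>
        c.modify ((PySem.Dict.mk det).get? "cls_id") 0 (· + 1)) PySem.Dict.empty).getD v 0
    = (l.map (fun det => (PySem.Dict.mk det).get? "cls_id")).count v := by
  rw [show l.foldl (fun (c : PySem.Dict (Option Int) Int) det =>
        c.modify ((PySem.Dict.mk det).get? "cls_id") 0 (· + 1)) PySem.Dict.empty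
      = (l.map (fun det => (PySem.Dict.mk det).get? "cls_id")).foldl
          (fun (c : PySem.Dict (Option Int) Int) x => c.modify x 0 (· + 1)) PySem.Dict.empty
      from by rw [List.foldl_map]]
  rw [PySem.Dict.getD_foldl_modify_add_one]
  simp [PySem.Dict.getD, PySem.Dict.get?, PySem.Dict.empty]

-- ===== VERDICT (by name: the statement is the Claim_ definition above) =====
theorem count_defects_spec : Claim_equal_count_defects := by
  intro detections is_camera_0 _ _
  unfold Spec_count_defects count_defects count_defects_alt
  cases is_camera_0 with
  | true =>
    simp only [reduceIte]
    rw [loopA_eq_counts _ 4 3 (by decide), counterB_getD, counterB_getD]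
    simp
  | false =>
    simp only [Bool.false_eq_true, reduceIte]
    rw [loopA_eq_counts _ 1 0 (by decide), counterB_getD, counterB_getD]
    simp
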